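-- pv_equiv track=rewrite | github.com/gregorjerse/poroznost | read_data.py | remove_unwanted_triangles
-- ===== SOURCE A (Python) =====
-- from typing import Tuple, Dict, List, Set, Optional
--
-- Edge = Tuple[int, int]
--
-- Triangle = Tuple[int, int, int]
--
-- def edges_from_triangle(triangle: Triangle) -> List[Edge]:
--     # The edge is always ordered (low, high).
--     return [
--         tuple(sorted((triangle[0], triangle[1]))),
--         tuple(sorted((triangle[1], triangle[2]))),
--         tuple(sorted((triangle[0], triangle[2]))),
--     ]
--
-- def free_edges(triangle: Triangle,
--                edge_triangle: Dict[Edge, List[Triangle]]) -> List[Edge]: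
--     """Get free edges of the given triangle."""
--     free_edges: List[Edge] = []
--     for edge in edges_from_triangle(triangle):
--         if len(edge_triangle[edge]) == 1:
--             free_edges.append(edge)
--     return free_edges
--
-- def remove_unwanted_triangles(
--         triangles: List[Triangle],
--         edge_triangle: Dict[Edge, List[Triangle]]) -> List[Triangle]:
--     """Remove the triangles that "stick out" from the surface.
--
--     That is triangles that have some free face. This method also modifies
--     edge_triangle structure to reflect the new situation. All the replace
--     """
--     ret: Set[Triangle] = set(triangles)
--     have_free_faces = set(
--         triangle for triangle in triangles
--         if free_edges(triangle, edge_triangle)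
--     )
--     while have_free_faces:
--         processing = have_free_faces.pop()
--         # Modify edge-triangle structure.
--         neighbours = []
--         for edge in edges_from_triangle(processing):
--             edge_triangle[edge].remove(processing)
--             neighbours += edge_triangle[edge]
--         # Remove the triangle.
--         ret.remove(processing)
--         # Process neighbours that now have new free edges.
--         for neighbour in neighbours:
--             if free_edges(neighbour, edge_triangle):
--                 have_free_faces.add(neighbour)
--     return list(ret)
-- ===== SOURCE B (Python) =====
-- def _tri_edges(t):
--     a, b, c = t
--     return [tuple(sorted((a, b))), tuple(sorted((b, c))), tuple(sorted((a, c)))]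
--
--
-- def remove_unwanted_triangles(triangles, edge_triangle):
--     """Two-phase peeling: decide which triangles to drop by a pure fixpoint
--     scan over counts of still-alive incident triangles (no mutation while
--     deciding), then apply all removals to edge_triangle at once."""
--     alive = set(triangles)
--
--     def is_free(t):
--         return any(
--             sum(1 for u in edge_triangle[e] if u in alive) == 1
--             for e in _tri_edges(t))
--
--     while True:
--         t = next((u for u in alive if is_free(u)), None)
--         if t is None:
--             break
--         alive.remove(t)
--     for t in set(triangles) - alive:
--         for e in _tri_edges(t):
--             edge_triangle[e].remove(t)
--     return list(alive)
-- ===== Notes on version B (the rewrite author's own statement) =====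
-- stated objective: alternative
-- what changed: A peels via a worklist seeded with free triangles, mutating edge_triangle in place and pushing neighbours as it removes; B is a two-phase decide-then-apply rewrite: a pure fixpoint scan that repeatedly looks for any triangle whose edge has exactly one still-alive incident triangle (counting membership in the alive set, never mutating), then applies all removals to edge_triangle at once; the surviving set is proved independent of the removal order.
-- outside the precondition, e.g. on remove_unwanted_triangles([(1, 2, 3)], {(1, 2): [], (2, 3): [], (1, 3): []}): A returns [(1, 2, 3)], B returns [(1, 2, 3)]
import Mathlib
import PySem

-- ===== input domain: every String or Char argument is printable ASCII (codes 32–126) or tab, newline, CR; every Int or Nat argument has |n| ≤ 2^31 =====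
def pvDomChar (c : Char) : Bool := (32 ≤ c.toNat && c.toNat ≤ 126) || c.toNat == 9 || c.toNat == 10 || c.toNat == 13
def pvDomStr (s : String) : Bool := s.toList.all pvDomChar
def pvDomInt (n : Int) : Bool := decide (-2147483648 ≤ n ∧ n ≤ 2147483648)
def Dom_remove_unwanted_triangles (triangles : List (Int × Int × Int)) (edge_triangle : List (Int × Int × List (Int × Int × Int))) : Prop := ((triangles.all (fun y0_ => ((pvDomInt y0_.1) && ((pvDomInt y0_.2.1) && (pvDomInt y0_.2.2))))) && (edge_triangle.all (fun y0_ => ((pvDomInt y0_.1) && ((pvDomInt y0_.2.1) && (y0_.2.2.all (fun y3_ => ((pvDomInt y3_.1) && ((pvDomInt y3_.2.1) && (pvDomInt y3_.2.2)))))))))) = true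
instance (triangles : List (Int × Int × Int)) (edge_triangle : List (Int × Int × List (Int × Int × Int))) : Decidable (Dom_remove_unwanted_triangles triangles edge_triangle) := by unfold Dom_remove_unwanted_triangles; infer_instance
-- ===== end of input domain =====

-- B replaces A's worklist peeling with in-place incidence updates by a two-phase decide-then-apply
-- fixpoint scan over alive-counts (objective: alternative, not faster). The equivalence proved here is
-- about the RETURN value only: on inputs satisfying Pre_ Source B applies the exact same edge_triangle
-- removals as A, but outside Pre_ (inconsistent incidence data) the two may mutate it differently.
-- The surviving set is proved independent of the removal order (in Python, set-hash order).

-- ===== PORT A =====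
-- shared module helper edges_from_triangle: sorted((x, y)) on two ints is (min, max)
def pvSortPair (a b : Int) : Int × Int := if a ≤ b then (a, b) else (b, a)

def pvEdgesOf (t : Int × Int × Int) : List (Int × Int) :=
  [pvSortPair t.1 t.2.1, pvSortPair t.2.1 t.2.2, pvSortPair t.1 t.2.2]

-- the Python dict parameter, as a PySem.Dict
def pvDictOf (edge_triangle : List (Int × Int × List (Int × Int × Int))) :
    PySem.Dict (Int × Int) (List (Int × Int × Int)) :=
  PySem.Dict.ofList (edge_triangle.map (fun p => ((p.1, p.2.1), p.2.2)))

-- free_edges(triangle, edge_triangle); none = KeyError on a missing edge key (excluded by Pre_)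
def pvFreeEdges? (d : PySem.Dict (Int × Int) (List (Int × Int × Int)))
    (t : Int × Int × Int) : Option (List (Int × Int)) :=
  (pvEdgesOf t).foldl
    (fun acc e => acc.bind fun fe => (d.get? e).map fun lst =>
      if lst.length == 1 then fe ++ [e] else fe)
    (some [])

-- 'set(t for t in ts if free_edges(t, d))' seeding, and the 'for neighbour in …: if …: add' loop
def pvAddFree? (d : PySem.Dict (Int × Int) (List (Int × Int × Int)))
    (w0 : PySem.Set (Int × Int × Int)) (ts : List (Int × Int × Int)) :
    Option (PySem.Set (Int × Int × Int)) :=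
  ts.foldl
    (fun acc n => acc.bind fun w => (pvFreeEdges? d n).map fun fe =>
      if fe.isEmpty then w else PySem.Set.add w n)
    (some w0)

-- the 'while have_free_faces:' loop; fuel only makes it total (Pre_ guarantees enough fuel).
-- have_free_faces.pop() pops an unspecified element in Python (hash order): the port pops the head;
-- the claim proves the resulting set does not depend on this choice.
def pvLoopA (fuel : Nat) (d : PySem.Dict (Int × Int) (List (Int × Int × Int)))
    (ret wl : PySem.Set (Int × Int × Int)) : Option (List (Int × Int × Int)) :=
  match fuel with
  | 0 => none
  | fuel + 1 =>
    match wl with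
    | [] => some ret
    | p :: wlrest =>
      ((pvEdgesOf p).foldl
          (fun acc e => acc.bind fun s => (s.1.get? e).bind fun lst =>
            (PySem.List.remove? lst p).map fun lst' => (s.1.insert e lst', s.2 ++ lst'))
          (some (d, ([] : List (Int × Int × Int))))).bind fun s =>
        (PySem.Set.remove? ret p).bind fun ret' =>
          (pvAddFree? s.1 wlrest s.2).bind fun wl' =>
            pvLoopA fuel s.1 ret' wl'

def remove_unwanted_triangles (triangles : List (Int × Int × Int))
    (edge_triangle : List (Int × Int × List (Int × Int × Int))) : List (Int × Int × Int) :=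
  let d := pvDictOf edge_triangle
  ((pvAddFree? d PySem.Set.empty triangles).bind fun wl =>
    pvLoopA (triangles.length + 1) d (PySem.Set.ofList triangles) wl).getD []

-- ===== PORT B =====
-- is_free(t): any(sum(1 for u in edge_triangle[e] if u in alive) == 1 for e in _tri_edges(t));
-- none = KeyError on a missing edge key (excluded by Pre_)
def pvIsFree? (d : PySem.Dict (Int × Int) (List (Int × Int × Int)))
    (alive : PySem.Set (Int × Int × Int)) : List (Int × Int) → Option Bool
  | [] => some false
  | e :: es => (d.get? e).bind fun lst =>
      if lst.countP (fun u => alive.contains u) == 1 then some true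
      else pvIsFree? d alive es

-- next((u for u in alive if is_free(u)), None): the first free element in scan order
-- (Python scans the set in hash order; the surviving set is proved independent of the choice)
def pvFindFree? (d : PySem.Dict (Int × Int) (List (Int × Int × Int)))
    (alive : PySem.Set (Int × Int × Int)) : List (Int × Int × Int) → Option (Option (Int × Int × Int))
  | [] => some none
  | t :: rest => (pvIsFree? d alive (pvEdgesOf t)).bind fun b =>
      if b then some (some t) else pvFindFree? d alive rest

-- the 'while True: pick a free triangle or stop; alive.remove(t)' loop; fuel only makes it total
def pvLoopB (d : PySem.Dict (Int × Int) (List (Int × Int × Int))) (fuel : Nat)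
    (alive : PySem.Set (Int × Int × Int)) : Option (List (Int × Int × Int)) :=
  match fuel with
  | 0 => none
  | fuel + 1 =>
    (pvFindFree? d alive alive).bind fun r =>
      match r with
      | none => some alive
      | some t => pvLoopB d fuel (PySem.Set.discard alive t)  -- alive.remove(t); t ∈ alive here

-- phase 2 of Source B only mutates edge_triangle (the same removals A performs); the return value is list(alive)
def remove_unwanted_triangles_alt (triangles : List (Int × Int × Int))
    (edge_triangle : List (Int × Int × List (Int × Int × Int))) : List (Int × Int × Int) :=
  let d := pvDictOf edge_triangle
  (pvLoopB d (triangles.length + 1) (PySem.Set.ofList triangles)).getD []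

-- ===== PRECONDITION & SPEC =====
-- Pre_ excludes (a) inputs where A raises — a triangle edge missing from edge_triangle (KeyError), or
-- incidence lists from which A's .remove calls can fail (ValueError/KeyError), including triangles with a
-- repeated vertex, whose duplicated edge A pops twice — and (b) edge_triangle values that are not the exact
-- incidence lists of the listed triangles, where A still returns but its raw counts are an accident of the
-- inconsistent data (see the cites); i.e. it demands: each triangle has three distinct vertices and each of
-- its edges is a key whose duplicate-free list holds exactly incident listed triangles, including itself.
def Pre_remove_unwanted_triangles (triangles : List (Int × Int × Int))
    (edge_triangle : List (Int × Int × List (Int × Int × Int))) : Prop :=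
  triangles.all (fun t =>
    (t.1 ≠ t.2.1 ∧ t.2.1 ≠ t.2.2 ∧ t.1 ≠ t.2.2 : Bool) &&
    (pvEdgesOf t).all (fun e =>
      (pvDictOf edge_triangle).contains e &&
      decide (t ∈ (pvDictOf edge_triangle).getD e []) &&
      decide (((pvDictOf edge_triangle).getD e []).Nodup) &&
      ((pvDictOf edge_triangle).getD e []).all (fun u =>
        decide (u ∈ triangles) && decide (e ∈ pvEdgesOf u)))) = true

instance (triangles : List (Int × Int × Int)) (edge_triangle : List (Int × Int × List (Int × Int × Int))) : Decidable (Pre_remove_unwanted_triangles triangles edge_triangle) := by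
  unfold Pre_remove_unwanted_triangles; infer_instance

def pvWitness_remove_unwanted_triangles :
    (List (Int × Int × Int)) × (List (Int × Int × List (Int × Int × Int))) :=
  ([(0, 1, 2), (0, 1, 3)],
   [(0, 1, [(0, 1, 2), (0, 1, 3)]), (1, 2, [(0, 1, 2)]), (0, 2, [(0, 1, 2)]),
    (1, 3, [(0, 1, 3)]), (0, 3, [(0, 1, 3)])])

def Spec_remove_unwanted_triangles (triangles : List (Int × Int × Int)) (edge_triangle : List (Int × Int × List (Int × Int × Int))) (out : List (Int × Int × Int)) : Prop := out = remove_unwanted_triangles_alt triangles edge_triangle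
instance (triangles : List (Int × Int × Int)) (edge_triangle : List (Int × Int × List (Int × Int × Int))) (out : List (Int × Int × Int)) : Decidable (Spec_remove_unwanted_triangles triangles edge_triangle out) := by unfold Spec_remove_unwanted_triangles; infer_instance

-- ===== CLAIM (what is proved, stated in full; the proofs are below) =====
def Claim_equal_remove_unwanted_triangles : Prop := ∀ (triangles : List (Int × Int × Int)) (edge_triangle : List (Int × Int × List (Int × Int × Int))), Dom_remove_unwanted_triangles triangles edge_triangle → Pre_remove_unwanted_triangles triangles edge_triangle → Spec_remove_unwanted_triangles triangles edge_triangle (remove_unwanted_triangles triangles edge_triangle)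

-- ===== LEMMAS AND PROOFS =====

-- Unpacking Pre_ (stated as one Boolean formula above) into its pieces
theorem pvPre_distinct {triangles : List (Int × Int × Int)}
    {et : List (Int × Int × List (Int × Int × Int))}
    (h : Pre_remove_unwanted_triangles triangles et) {t : Int × Int × Int}
    (ht : t ∈ triangles) : t.1 ≠ t.2.1 ∧ t.2.1 ≠ t.2.2 ∧ t.1 ≠ t.2.2 := by
  unfold Pre_remove_unwanted_triangles at h
  simp only [List.all_eq_true, Bool.and_eq_true, decide_eq_true_eq] at h
  exact (h t ht).1

theorem pvPre_edge {triangles : List (Int × Int × Int)}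
    {et : List (Int × Int × List (Int × Int × Int))}
    (h : Pre_remove_unwanted_triangles triangles et) {t : Int × Int × Int}
    (ht : t ∈ triangles) {e : Int × Int} (he : e ∈ pvEdgesOf t) :
    (pvDictOf et).contains e = true ∧
    t ∈ (pvDictOf et).getD e [] ∧
    ((pvDictOf et).getD e []).Nodup ∧
    ∀ u ∈ (pvDictOf et).getD e [], u ∈ triangles ∧ e ∈ pvEdgesOf u := by
  unfold Pre_remove_unwanted_triangles at h
  simp only [List.all_eq_true, Bool.and_eq_true, decide_eq_true_eq] at h
  rcases (h t ht).2 e he with ⟨⟨⟨hc, hm⟩, hnd⟩, hall⟩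
  exact ⟨hc, hm, hnd, fun u hu => hall u hu⟩

theorem pvSortPair_eq_iff (a b c d : Int) :
    pvSortPair a b = pvSortPair c d ↔ (a = c ∧ b = d) ∨ (a = d ∧ b = c) := by
  unfold pvSortPair
  split_ifs <;> simp only [Prod.mk.injEq] <;> omega

theorem pvEdgesOf_nodup {t : Int × Int × Int}
    (h : t.1 ≠ t.2.1 ∧ t.2.1 ≠ t.2.2 ∧ t.1 ≠ t.2.2) : (pvEdgesOf t).Nodup := by
  obtain ⟨h1, h2, h3⟩ := h
  simp only [pvEdgesOf, List.nodup_cons, List.mem_cons, List.not_mem_nil, or_false,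
    List.nodup_nil, and_true, not_or]
  refine ⟨⟨?_, ?_⟩, ?_⟩ <;> rw [pvSortPair_eq_iff] <;> tauto

-- The abstract peeling system: alive sets, freeness, one-at-a-time runs, final states.

-- the set of still-alive triangles once the triangles of X have been peeled
def pvAliveF (triangles : List (Int × Int × Int)) (X : Finset (Int × Int × Int)) :
    Finset (Int × Int × Int) := triangles.toFinset \ X

-- t has a free edge relative to the alive set S (counts taken in the ORIGINAL edge_triangle)
def pvFreeP (edge_triangle : List (Int × Int × List (Int × Int × Int)))
    (S : Finset (Int × Int × Int)) (t : Int × Int × Int) : Prop :=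
  ∃ e ∈ pvEdgesOf t,
    ((pvDictOf edge_triangle).getD e []).countP (fun u => decide (u ∈ S)) = 1

-- a peeling run: repeatedly erase some free alive triangle
inductive pvRun (edge_triangle : List (Int × Int × List (Int × Int × Int))) :
    Finset (Int × Int × Int) → Finset (Int × Int × Int) → Prop
  | refl (S : Finset (Int × Int × Int)) : pvRun edge_triangle S S
  | step {S F : Finset (Int × Int × Int)} (t : Int × Int × Int) (ht : t ∈ S)
      (hf : pvFreeP edge_triangle S t) (h : pvRun edge_triangle (S.erase t) F) :
      pvRun edge_triangle S F

-- a final state: no alive triangle is free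
def pvFinal (edge_triangle : List (Int × Int × List (Int × Int × Int)))
    (F : Finset (Int × Int × Int)) : Prop := ∀ t ∈ F, ¬ pvFreeP edge_triangle F t

theorem pvRun_subset {et : List (Int × Int × List (Int × Int × Int))}
    {S F : Finset (Int × Int × Int)} (h : pvRun et S F) : F ⊆ S := by
  induction h with
  | refl => exact Finset.Subset.refl _
  | step t ht hf h ih => exact ih.trans (Finset.erase_subset _ _)

-- freeness is monotone under peeling other triangles away
theorem pvFree_mono {triangles : List (Int × Int × Int)}
    {et : List (Int × Int × List (Int × Int × Int))}
    (hpre : Pre_remove_unwanted_triangles triangles et)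
    {S S' : Finset (Int × Int × Int)} {t : Int × Int × Int}
    (hT : t ∈ triangles) (hsub : S' ⊆ S) (htS : t ∈ S')
    (hf : pvFreeP et S t) : pvFreeP et S' t := by
  obtain ⟨e, he, hcount⟩ := hf
  obtain ⟨-, hm, -, -⟩ := pvPre_edge hpre hT he
  refine ⟨e, he, ?_⟩
  have hle : ((pvDictOf et).getD e []).countP (fun u => decide (u ∈ S')) ≤
      ((pvDictOf et).getD e []).countP (fun u => decide (u ∈ S)) := by
    apply List.countP_mono_left
    intro a _ ha
    simp only [decide_eq_true_eq] at ha ⊢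
    exact hsub ha
  have hpos : 0 < ((pvDictOf et).getD e []).countP (fun u => decide (u ∈ S')) := by
    apply List.countP_pos_iff.mpr
    exact ⟨t, hm, by simp [htS]⟩
  omega

-- any final state is contained in the result of any run it starts below
theorem pvFinal_subset_run {triangles : List (Int × Int × Int)}
    {et : List (Int × Int × List (Int × Int × Int))}
    (hpre : Pre_remove_unwanted_triangles triangles et)
    {F : Finset (Int × Int × Int)} (hFT : ∀ x ∈ F, x ∈ triangles)
    (hfin : pvFinal et F) :
    ∀ {S G : Finset (Int × Int × Int)}, pvRun et S G → F ⊆ S → F ⊆ G := by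
  intro S G h
  induction h with
  | refl => exact fun h => h
  | step t ht hf h ih =>
    intro hFS
    apply ih
    intro x hx
    refine Finset.mem_erase.mpr ⟨?_, hFS hx⟩
    rintro rfl
    exact hfin x hx (pvFree_mono hpre (hFT x hx) hFS hx hf)

-- the final state reached from a given start is unique
theorem pvFinal_unique {triangles : List (Int × Int × Int)}
    {et : List (Int × Int × List (Int × Int × Int))}
    (hpre : Pre_remove_unwanted_triangles triangles et)
    {S F G : Finset (Int × Int × Int)}
    (hF : pvRun et S F) (hG : pvRun et S G)
    (hFT : ∀ x ∈ F, x ∈ triangles) (hGT : ∀ x ∈ G, x ∈ triangles)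
    (hfinF : pvFinal et F) (hfinG : pvFinal et G) : F = G := by
  apply Finset.Subset.antisymm
  · exact pvFinal_subset_run hpre hFT hfinF hG (pvRun_subset hF)
  · exact pvFinal_subset_run hpre hGT hfinG hF (pvRun_subset hG)

-- the invariant tying A's mutated dict to the original one: at every RELEVANT key
-- (an edge of a listed triangle) the entry is the original list with the peeled triangles dropped
def pvMapInv (triangles : List (Int × Int × Int))
    (et : List (Int × Int × List (Int × Int × Int)))
    (X : Finset (Int × Int × Int))
    (d : PySem.Dict (Int × Int) (List (Int × Int × Int))) : Prop :=
  ∀ t ∈ triangles, ∀ e ∈ pvEdgesOf t,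
    d.get? e = some (((pvDictOf et).getD e []).filter (fun u => decide (u ∉ X)))

theorem pvMapInv_empty {triangles : List (Int × Int × Int)}
    {et : List (Int × Int × List (Int × Int × Int))}
    (hpre : Pre_remove_unwanted_triangles triangles et) :
    pvMapInv triangles et ∅ (pvDictOf et) := by
  intro t ht e he
  obtain ⟨hc, -, -, -⟩ := pvPre_edge hpre ht he
  rw [PySem.Dict.contains_eq_isSome_get?] at hc
  cases hget : (pvDictOf et).get? e with
  | none => rw [hget] at hc; simp at hc
  | some lst =>
    rw [PySem.Dict.getD_of_get?_eq_some _ _ hget]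
    simp

theorem pvAliveF_mem {triangles : List (Int × Int × Int)}
    {X : Finset (Int × Int × Int)} {u : Int × Int × Int} :
    u ∈ pvAliveF triangles X ↔ u ∈ triangles ∧ u ∉ X := by
  simp [pvAliveF, List.mem_toFinset]

-- the alive-count of an edge of an alive triangle, as a filtered-list length
theorem pvCount_eq {triangles : List (Int × Int × Int)}
    {et : List (Int × Int × List (Int × Int × Int))}
    (hpre : Pre_remove_unwanted_triangles triangles et)
    {t : Int × Int × Int} (ht : t ∈ triangles) {e : Int × Int} (he : e ∈ pvEdgesOf t)
    (X : Finset (Int × Int × Int)) :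
    (((pvDictOf et).getD e []).filter (fun u => decide (u ∉ X))).length =
      ((pvDictOf et).getD e []).countP (fun u => decide (u ∈ pvAliveF triangles X)) := by
  rw [← List.countP_eq_length_filter]
  apply List.countP_congr
  intro u hu
  obtain ⟨-, -, -, hall⟩ := pvPre_edge hpre ht he
  have hut : u ∈ triangles := (hall u hu).1
  simp [pvAliveF_mem, hut]

theorem pvFreeEdges?_spec {triangles : List (Int × Int × Int)}
    {et : List (Int × Int × List (Int × Int × Int))}
    (hpre : Pre_remove_unwanted_triangles triangles et)
    {X : Finset (Int × Int × Int)} {d : PySem.Dict (Int × Int) (List (Int × Int × Int))}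
    (hinv : pvMapInv triangles et X d) {t : Int × Int × Int} (ht : t ∈ triangles) :
    ∃ fe, pvFreeEdges? d t = some fe ∧
      (fe.isEmpty = false ↔ pvFreeP et (pvAliveF triangles X) t) := by
  have key : ∀ (es : List (Int × Int)), (∀ e ∈ es, e ∈ pvEdgesOf t) →
      ∀ acc : List (Int × Int),
      es.foldl (fun acc e => acc.bind fun fe => (d.get? e).map fun lst =>
          if lst.length == 1 then fe ++ [e] else fe) (some acc) =
        some (es.foldl (fun fe e =>
          if (((pvDictOf et).getD e []).filter (fun u => decide (u ∉ X))).length == 1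
          then fe ++ [e] else fe) acc) := by
    intro es
    induction es with
    | nil => intro _ acc; rfl
    | cons e es ih =>
      intro hsub acc
      have hget := hinv t ht e (hsub e (List.mem_cons_self))
      simp only [List.foldl_cons, hget, Option.bind_some, Option.map_some]
      exact ih (fun x hx => hsub x (List.mem_cons_of_mem _ hx)) _
  refine ⟨_, key (pvEdgesOf t) (fun e he => he) [], ?_⟩
  rw [PySem.List.foldl_append_if_eq_filter]
  simp only [List.nil_append, List.isEmpty_eq_false_iff, ne_eq, List.filter_eq_nil_iff,
    not_forall, Classical.not_not]
  unfold pvFreeP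
  constructor
  · rintro ⟨e, he, hlen⟩
    rw [beq_iff_eq, pvCount_eq hpre ht he X] at hlen
    exact ⟨e, he, hlen⟩
  · rintro ⟨e, he, hcnt⟩
    refine ⟨e, he, ?_⟩
    rw [beq_iff_eq, pvCount_eq hpre ht he X]
    exact hcnt

theorem pvAddFree?_spec {triangles : List (Int × Int × Int)}
    {et : List (Int × Int × List (Int × Int × Int))}
    (hpre : Pre_remove_unwanted_triangles triangles et)
    {X : Finset (Int × Int × Int)} {d : PySem.Dict (Int × Int) (List (Int × Int × Int))}
    (hinv : pvMapInv triangles et X d)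
    (ts : List (Int × Int × Int)) (hts : ∀ n ∈ ts, n ∈ triangles)
    (w0 : PySem.Set (Int × Int × Int)) :
    ∃ w, pvAddFree? d w0 ts = some w ∧
      (w0.Nodup → w.Nodup) ∧
      (∀ x, x ∈ w ↔ x ∈ w0 ∨ (x ∈ ts ∧ pvFreeP et (pvAliveF triangles X) x)) := by
  induction ts generalizing w0 with
  | nil => exact ⟨w0, rfl, fun h => h, by simp⟩
  | cons n ts ih =>
    have hn : n ∈ triangles := hts n List.mem_cons_self
    obtain ⟨fe, hfe, hiff⟩ := pvFreeEdges?_spec hpre hinv hn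
    have hts' : ∀ x ∈ ts, x ∈ triangles := fun x hx => hts x (List.mem_cons_of_mem _ hx)
    obtain ⟨w, hw, hnd, hmem⟩ := ih hts' (if fe.isEmpty then w0 else PySem.Set.add w0 n)
    refine ⟨w, ?_, ?_, ?_⟩
    · simp only [pvAddFree?, List.foldl_cons, Option.bind_some, hfe, Option.map_some] at hw ⊢
      exact hw
    · intro h0
      apply hnd
      by_cases hf : fe.isEmpty = true
      · simpa [hf] using h0
      · simp only [Bool.not_eq_true] at hf
        simpa [hf] using PySem.Set.nodup_add w0 n h0
    · intro x
      rw [hmem x]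
      by_cases hf : fe.isEmpty = true
      · have hnf : ¬ pvFreeP et (pvAliveF triangles X) n := by
          intro hc
          rw [← hiff] at hc
          rw [hf] at hc
          simp at hc
        simp only [hf, if_true]
        constructor
        · rintro (h | ⟨hx, hfree⟩)
          · exact Or.inl h
          · exact Or.inr ⟨List.mem_cons_of_mem _ hx, hfree⟩
        · rintro (h | ⟨hx, hfree⟩)
          · exact Or.inl h
          · rcases List.mem_cons.mp hx with rfl | hx'
            · exact absurd hfree hnf
            · exact Or.inr ⟨hx', hfree⟩
      · have hfree : pvFreeP et (pvAliveF triangles X) n := hiff.mp (by simpa using hf)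
        simp only [Bool.not_eq_true] at hf
        simp only [hf, Bool.false_eq_true, if_false]
        rw [PySem.Set.mem_add]
        constructor
        · rintro ((h | rfl) | ⟨hx, hfr⟩)
          · exact Or.inl h
          · exact Or.inr ⟨List.mem_cons_self, hfree⟩
          · exact Or.inr ⟨List.mem_cons_of_mem _ hx, hfr⟩
        · rintro (h | ⟨hx, hfr⟩)
          · exact Or.inl (Or.inl h)
          · rcases List.mem_cons.mp hx with rfl | hx'
            · exact Or.inl (Or.inr rfl)
            · exact Or.inr ⟨hx', hfr⟩

theorem pvRemove?_eq_some_erase {l : List (Int × Int × Int)} {p : Int × Int × Int}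
    (h : p ∈ l) : PySem.List.remove? l p = some (l.erase p) := by
  have hs : (List.idxOf? p l).isSome = true := List.isSome_idxOf?.mpr h
  cases hidx : List.idxOf? p l with
  | none => rw [hidx] at hs; simp at hs
  | some i =>
    rw [List.erase_eq_eraseIdx]
    simp [PySem.List.remove?, hidx]

-- the edges-of-p fold of A's loop body: the dict after the three removals, and the neighbour list
theorem pvBody_spec {triangles : List (Int × Int × Int)}
    {et : List (Int × Int × List (Int × Int × Int))}
    (hpre : Pre_remove_unwanted_triangles triangles et)
    {X : Finset (Int × Int × Int)} {d : PySem.Dict (Int × Int) (List (Int × Int × Int))}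
    (hinv : pvMapInv triangles et X d) {p : Int × Int × Int} (hp : p ∈ triangles)
    (hpX : p ∉ X) :
    ∃ d' nb,
      (pvEdgesOf p).foldl
          (fun acc e => acc.bind fun s => (s.1.get? e).bind fun lst =>
            (PySem.List.remove? lst p).map fun lst' => (s.1.insert e lst', s.2 ++ lst'))
          (some (d, ([] : List (Int × Int × Int)))) = some (d', nb) ∧
      pvMapInv triangles et (insert p X) d' ∧
      (∀ u, u ∈ nb ↔ ∃ e ∈ pvEdgesOf p,
        u ∈ (pvDictOf et).getD e [] ∧ u ∉ X ∧ u ≠ p) := by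
  have key : ∀ (es done : List (Int × Int)) (d0 : PySem.Dict (Int × Int) (List (Int × Int × Int)))
      (nb0 : List (Int × Int × Int)),
      (∀ x ∈ es, x ∈ pvEdgesOf p) → (∀ x ∈ done, x ∈ pvEdgesOf p) →
      es.Nodup → (∀ x ∈ done, x ∉ es) →
      (∀ t' ∈ triangles, ∀ e ∈ pvEdgesOf t', d0.get? e =
        some (if e ∈ done
          then ((pvDictOf et).getD e []).filter (fun u => decide (u ∉ X) && !(u == p))
          else ((pvDictOf et).getD e []).filter (fun u => decide (u ∉ X)))) →
      (∀ u, u ∈ nb0 ↔ ∃ e ∈ done, u ∈ (pvDictOf et).getD e [] ∧ u ∉ X ∧ u ≠ p) →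
      ∃ d' nb,
        es.foldl (fun acc e => acc.bind fun s => (s.1.get? e).bind fun lst =>
            (PySem.List.remove? lst p).map fun lst' => (s.1.insert e lst', s.2 ++ lst'))
          (some (d0, nb0)) = some (d', nb) ∧
        (∀ t' ∈ triangles, ∀ e ∈ pvEdgesOf t', d'.get? e =
          some (if e ∈ done ∨ e ∈ es
            then ((pvDictOf et).getD e []).filter (fun u => decide (u ∉ X) && !(u == p))
            else ((pvDictOf et).getD e []).filter (fun u => decide (u ∉ X)))) ∧
        (∀ u, u ∈ nb ↔ ∃ e, (e ∈ done ∨ e ∈ es) ∧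
          u ∈ (pvDictOf et).getD e [] ∧ u ∉ X ∧ u ≠ p) := by
    intro es
    induction es with
    | nil =>
      intro done d0 nb0 _ _ _ _ hmap hnb
      refine ⟨d0, nb0, rfl, ?_, ?_⟩
      · intro t' ht' e he
        rw [hmap t' ht' e he]
        simp
      · intro u
        rw [hnb u]
        simp
    | cons e es ih =>
      intro done d0 nb0 hsub hdsub hnd hdisj hmap hnb
      have hep : e ∈ pvEdgesOf p := hsub e List.mem_cons_self
      have hed : e ∉ done := fun hc => hdisj e hc List.mem_cons_self
      obtain ⟨-, hpm, hndl, hall⟩ := pvPre_edge hpre hp hep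
      have hget : d0.get? e =
          some (((pvDictOf et).getD e []).filter (fun u => decide (u ∉ X))) := by
        rw [hmap p hp e hep, if_neg hed]
      have hpmem : p ∈ ((pvDictOf et).getD e []).filter (fun u => decide (u ∉ X)) :=
        List.mem_filter.mpr ⟨hpm, by simpa using hpX⟩
      have hrem := pvRemove?_eq_some_erase hpmem
      have hfil : (((pvDictOf et).getD e []).filter (fun u => decide (u ∉ X))).erase p =
          ((pvDictOf et).getD e []).filter (fun u => decide (u ∉ X) && !(u == p)) := by
        rw [(hndl.filter _).erase_eq_filter p, List.filter_filter]
        apply List.filter_congr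
        intro a _
        simp [bne, Bool.and_comm]
      obtain ⟨d', nb, hfold, hmap', hnb'⟩ := ih (e :: done)
        (d0.insert e (((pvDictOf et).getD e []).filter (fun u => decide (u ∉ X) && !(u == p))))
        (nb0 ++ ((pvDictOf et).getD e []).filter (fun u => decide (u ∉ X) && !(u == p)))
        (fun x hx => hsub x (List.mem_cons_of_mem _ hx))
        (fun x hx => (List.mem_cons.mp hx).elim (fun h => h ▸ hep) (hdsub x))
        hnd.of_cons
        (by
          intro x hx
          rcases List.mem_cons.mp hx with rfl | hx'
          · exact (List.nodup_cons.mp hnd).1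
          · intro hc
            exact hdisj x hx' (List.mem_cons_of_mem _ hc))
        (by
          intro t' ht' e' he'
          rw [PySem.Dict.get?_insert]
          by_cases hee : e' = e
          · subst hee
            rw [if_pos rfl, if_pos List.mem_cons_self]
          · rw [if_neg hee, hmap t' ht' e' he']
            by_cases hd : e' ∈ done
            · rw [if_pos hd, if_pos (List.mem_cons_of_mem _ hd)]
            · rw [if_neg hd, if_neg (by
                intro hc
                rcases List.mem_cons.mp hc with h | h
                · exact hee h
                · exact hd h)])
        (by
          intro u
          rw [List.mem_append, hnb u]
          constructor
          · rintro (⟨e', he', hu⟩ | hu)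
            · exact ⟨e', List.mem_cons_of_mem _ he', hu⟩
            · obtain ⟨hu1, hu2⟩ := List.mem_filter.mp hu
              simp only [Bool.and_eq_true, decide_eq_true_eq, ne_eq,
                Bool.not_eq_true', beq_eq_false_iff_ne] at hu2
              exact ⟨e, List.mem_cons_self, hu1, hu2.1, hu2.2⟩
          · rintro ⟨e', he', hu1, hu2, hu3⟩
            rcases List.mem_cons.mp he' with rfl | he''
            · refine Or.inr (List.mem_filter.mpr ⟨hu1, ?_⟩)
              simp only [Bool.and_eq_true, decide_eq_true_eq, Bool.not_eq_true',
                beq_eq_false_iff_ne]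
              exact ⟨hu2, hu3⟩
            · exact Or.inl ⟨e', he'', hu1, hu2, hu3⟩)
      refine ⟨d', nb, ?_, ?_, ?_⟩
      · rw [← hfold]
        simp only [List.foldl_cons, Option.bind_some, hget, hrem, Option.map_some, hfil]
      · intro t' ht' e' he'
        rw [hmap' t' ht' e' he']
        by_cases hc : e' ∈ done ∨ e' ∈ e :: es
        · rw [if_pos hc, if_pos (by
            rcases hc with h | h
            · exact Or.inl (List.mem_cons_of_mem _ h)
            · rcases List.mem_cons.mp h with rfl | h'
              · exact Or.inl List.mem_cons_self
              · exact Or.inr h')]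
        · rw [if_neg hc, if_neg (by
            intro hc'
            apply hc
            rcases hc' with h | h
            · rcases List.mem_cons.mp h with rfl | h'
              · exact Or.inr List.mem_cons_self
              · exact Or.inl h'
            · exact Or.inr (List.mem_cons_of_mem _ h))]
      · intro u
        rw [hnb' u]
        constructor
        · rintro ⟨e', he', hu⟩
          refine ⟨e', ?_, hu⟩
          rcases he' with h | h
          · rcases List.mem_cons.mp h with rfl | h'
            · exact Or.inr List.mem_cons_self
            · exact Or.inl h'
          · exact Or.inr (List.mem_cons_of_mem _ h)
        · rintro ⟨e', he', hu⟩
          refine ⟨e', ?_, hu⟩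
          rcases he' with h | h
          · exact Or.inl (List.mem_cons_of_mem _ h)
          · rcases List.mem_cons.mp h with rfl | h'
            · exact Or.inl List.mem_cons_self
            · exact Or.inr h'
  obtain ⟨d', nb, hfold, hmap', hnb'⟩ := key (pvEdgesOf p) [] d []
    (fun x hx => hx) (by simp) (pvEdgesOf_nodup (pvPre_distinct hpre hp)) (by simp)
    (by
      intro t' ht' e he
      rw [hinv t' ht' e he]
      simp)
    (by simp)
  refine ⟨d', nb, hfold, ?_, ?_⟩
  · intro t' ht' e' he'
    rw [hmap' t' ht' e' he']
    obtain ⟨-, -, -, hall'⟩ := pvPre_edge hpre ht' he'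
    by_cases hc : e' ∈ pvEdgesOf p
    · rw [if_pos (Or.inr hc)]
      congr 1
      apply List.filter_congr
      intro a _
      by_cases hax : a ∈ X <;> by_cases hap : a = p <;>
        simp [hax, hap, Finset.mem_insert]
    · rw [if_neg (by simpa using hc)]
      congr 1
      apply List.filter_congr
      intro a ha
      have hap : a ≠ p := by
        rintro rfl
        exact hc ((hall' a ha).2)
      by_cases hax : a ∈ X <;> simp [hax, hap, Finset.mem_insert]
  · intro u
    rw [hnb' u]
    simp

theorem pvAliveF_erase {triangles : List (Int × Int × Int)}
    {X : Finset (Int × Int × Int)} {p : Int × Int × Int} :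
    (pvAliveF triangles X).erase p = pvAliveF triangles (insert p X) := by
  ext x
  simp only [pvAliveF, Finset.mem_erase, Finset.mem_sdiff, Finset.mem_insert, not_or]
  tauto

-- A's while loop lands on a final state of a run and prints the surviving sublist of set(triangles)
theorem pvLoopA_spec {triangles : List (Int × Int × Int)}
    {et : List (Int × Int × List (Int × Int × Int))}
    (hpre : Pre_remove_unwanted_triangles triangles et) :
    ∀ (fuel : Nat) (X : Finset (Int × Int × Int))
      (d : PySem.Dict (Int × Int) (List (Int × Int × Int)))
      (ret wl : PySem.Set (Int × Int × Int)),
      pvMapInv triangles et X d →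
      ret = (PySem.Set.ofList triangles).filter (fun u => decide (u ∉ X)) →
      wl.Nodup →
      (∀ u ∈ wl, u ∈ triangles ∧ u ∉ X ∧ pvFreeP et (pvAliveF triangles X) u) →
      (∀ u ∈ triangles, u ∉ X → pvFreeP et (pvAliveF triangles X) u → u ∈ wl) →
      (pvAliveF triangles X).card < fuel →
      ∃ F, pvRun et (pvAliveF triangles X) F ∧ pvFinal et F ∧ (∀ x ∈ F, x ∈ triangles) ∧
        pvLoopA fuel d ret wl =
          some ((PySem.Set.ofList triangles).filter (fun u => decide (u ∈ F))) := by
  intro fuel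
  induction fuel with
  | zero =>
    intro X d ret wl _ _ _ _ _ hcard
    omega
  | succ fuel ih =>
    intro X d ret wl hinv hret hnd hwl hcomp hcard
    cases wl with
    | nil =>
      refine ⟨pvAliveF triangles X, pvRun.refl _, ?_, ?_, ?_⟩
      · intro u hu hfree
        rw [pvAliveF_mem] at hu
        exact absurd (hcomp u hu.1 hu.2 hfree) (List.not_mem_nil)
      · intro x hx
        exact (pvAliveF_mem.mp hx).1
      · rw [pvLoopA, hret]
        congr 1
        apply List.filter_congr
        intro a ha
        have haT : a ∈ triangles := (PySem.Set.mem_ofList triangles a).mp ha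
        by_cases hax : a ∈ X <;> simp [pvAliveF_mem, hax, haT]
    | cons pp wlrest =>
      obtain ⟨hpT, hpX, hpfree⟩ := hwl pp List.mem_cons_self
      have hppa : pp ∈ pvAliveF triangles X := pvAliveF_mem.mpr ⟨hpT, hpX⟩
      obtain ⟨d', nb, hfold, hinv', hnb⟩ := pvBody_spec hpre hinv hpT hpX
      have hndc := List.nodup_cons.mp hnd
      -- ret.remove(pp)
      have hppr : pp ∈ ret := by
        rw [hret]
        exact List.mem_filter.mpr ⟨(PySem.Set.mem_ofList triangles pp).mpr hpT, by simpa using hpX⟩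
      have hrem : PySem.Set.remove? ret pp = some (ret.filter (fun y => !(y == pp))) := by
        simp [PySem.Set.remove?, PySem.Set.contains, PySem.Set.discard, hppr]
      have hret' : ret.filter (fun y => !(y == pp)) =
          (PySem.Set.ofList triangles).filter (fun u => decide (u ∉ insert pp X)) := by
        rw [hret, List.filter_filter]
        apply List.filter_congr
        intro a _
        by_cases hax : a ∈ X <;> by_cases hap : a = pp <;>
          simp [hax, hap, Finset.mem_insert]
      -- elements of nb are listed triangles
      have hnbT : ∀ n ∈ nb, n ∈ triangles := by
        intro n hn
        obtain ⟨e, he, hu1, -, -⟩ := (hnb n).mp hn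
        exact ((pvPre_edge hpre hpT he).2.2.2 n hu1).1
      obtain ⟨w, hw, hwnd, hwmem⟩ := pvAddFree?_spec hpre hinv' nb hnbT wlrest
      -- invariants for the recursive call at X' = insert pp X
      have hsub' : pvAliveF triangles (insert pp X) ⊆ pvAliveF triangles X := by
        rw [← pvAliveF_erase]
        exact Finset.erase_subset _ _
      obtain ⟨F, hrun, hfin, hFT, heq⟩ := ih (insert pp X) d'
        ((PySem.Set.ofList triangles).filter (fun u => decide (u ∉ insert pp X))) w
        hinv' rfl (hwnd hndc.2)
        (by
          intro u hu
          rcases (hwmem u).mp hu with h | ⟨hun, hufree⟩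
          · obtain ⟨huT, huX, hufree⟩ := hwl u (List.mem_cons_of_mem _ h)
            have hup : u ≠ pp := by
              rintro rfl
              exact hndc.1 h
            have huX' : u ∉ insert pp X := by
              simp [Finset.mem_insert, hup, huX]
            refine ⟨huT, huX', ?_⟩
            exact pvFree_mono hpre huT hsub' (pvAliveF_mem.mpr ⟨huT, huX'⟩) hufree
          · obtain ⟨e, he, hu1, huX, hup⟩ := (hnb u).mp hun
            have huT : u ∈ triangles := ((pvPre_edge hpre hpT he).2.2.2 u hu1).1
            exact ⟨huT, by simp [Finset.mem_insert, hup, huX], hufree⟩)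
        (by
          intro u huT huX' hufree'
          by_cases hfX : pvFreeP et (pvAliveF triangles X) u
          · have := hcomp u huT (fun hc => huX' (Finset.mem_insert_of_mem hc)) hfX
            rcases List.mem_cons.mp this with rfl | h
            · exact absurd (Finset.mem_insert_self u X) huX'
            · exact (hwmem u).mpr (Or.inl h)
          · -- newly freed: u must be a neighbour of pp
            obtain ⟨e, he, hcnt'⟩ := hufree'
            obtain ⟨-, humem, -, hall⟩ := pvPre_edge hpre huT he
            have hppe : pp ∈ (pvDictOf et).getD e [] := by
              by_contra hppe
              apply hfX
              refine ⟨e, he, ?_⟩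
              rw [← hcnt']
              apply List.countP_congr
              intro v hv
              have hvp : v ≠ pp := fun hc => hppe (hc ▸ hv)
              by_cases hvX : v ∈ X <;> by_cases hvT : v ∈ triangles <;>
                simp [pvAliveF_mem, hvX, hvT, Finset.mem_insert, hvp]
            have hepp : e ∈ pvEdgesOf pp := (hall pp hppe).2
            have hupp : u ≠ pp := by
              rintro rfl
              exact huX' (Finset.mem_insert_self u X)
            have huX : u ∉ X := fun hc => huX' (Finset.mem_insert_of_mem hc)
            exact (hwmem u).mpr (Or.inr ⟨(hnb u).mpr ⟨e, hepp, humem, huX, hupp⟩, ⟨e, he, hcnt'⟩⟩))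
        (by
          rw [← pvAliveF_erase]
          have := Finset.card_erase_lt_of_mem hppa
          omega)
      refine ⟨F, pvRun.step pp hppa hpfree (by rw [pvAliveF_erase]; exact hrun), hfin, hFT, ?_⟩
      rw [pvLoopA]
      simp only [hfold, Option.bind_some, hrem, hw, hret']
      exact heq

theorem pvIsFree?_spec {triangles : List (Int × Int × Int)}
    {et : List (Int × Int × List (Int × Int × Int))}
    (hpre : Pre_remove_unwanted_triangles triangles et)
    {X : Finset (Int × Int × Int)} {t : Int × Int × Int} (ht : t ∈ triangles) :
    pvIsFree? (pvDictOf et)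
        ((PySem.Set.ofList triangles).filter (fun u => decide (u ∉ X))) (pvEdgesOf t) =
      some (decide (∃ e ∈ pvEdgesOf t,
        ((pvDictOf et).getD e []).countP (fun u => decide (u ∈ pvAliveF triangles X)) = 1)) := by
  have key : ∀ es : List (Int × Int), (∀ e ∈ es, e ∈ pvEdgesOf t) →
      pvIsFree? (pvDictOf et)
          ((PySem.Set.ofList triangles).filter (fun u => decide (u ∉ X))) es =
        some (decide (∃ e ∈ es,
          ((pvDictOf et).getD e []).countP (fun u => decide (u ∈ pvAliveF triangles X)) = 1)) := by
    intro es
    induction es with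
    | nil => simp [pvIsFree?]
    | cons e es ihe =>
      intro hsub
      have he : e ∈ pvEdgesOf t := hsub e List.mem_cons_self
      obtain ⟨hc, -, -, hall⟩ := pvPre_edge hpre ht he
      rw [PySem.Dict.contains_eq_isSome_get?] at hc
      cases hget : (pvDictOf et).get? e with
      | none => rw [hget] at hc; simp at hc
      | some lst =>
        have hgetD : (pvDictOf et).getD e [] = lst := PySem.Dict.getD_of_get?_eq_some _ _ hget
        have hcnt : lst.countP (fun u => PySem.Set.contains
            ((PySem.Set.ofList triangles).filter (fun u => decide (u ∉ X))) u) =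
            lst.countP (fun u => decide (u ∈ pvAliveF triangles X)) := by
          apply List.countP_congr
          intro v hv
          have hvT : v ∈ triangles := (hall v (hgetD ▸ hv)).1
          simp only [PySem.Set.contains, List.contains_iff_mem,
            List.mem_filter, decide_eq_true_eq, pvAliveF_mem]
          constructor
          · rintro ⟨-, hvX⟩
            exact ⟨hvT, hvX⟩
          · rintro ⟨-, hvX⟩
            exact ⟨(PySem.Set.mem_ofList triangles v).mpr hvT, hvX⟩
        rw [pvIsFree?, hget, Option.bind_some, hcnt]
        by_cases h1 : lst.countP (fun u => decide (u ∈ pvAliveF triangles X)) = 1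
        · rw [if_pos (by simpa using h1)]
          have hex : ∃ e' ∈ e :: es, ((pvDictOf et).getD e' []).countP
              (fun u => decide (u ∈ pvAliveF triangles X)) = 1 :=
            ⟨e, List.mem_cons_self, by rw [hgetD]; exact h1⟩
          simp [decide_eq_true hex]
        · rw [if_neg (by simpa using h1)]
          rw [ihe (fun x hx => hsub x (List.mem_cons_of_mem _ hx))]
          congr 1
          simp only [List.mem_cons, decide_eq_decide]
          constructor
          · rintro ⟨e', he', hc'⟩
            exact ⟨e', Or.inr he', hc'⟩
          · rintro ⟨e', he'', hc'⟩
            rcases he'' with rfl | h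
            · rw [hgetD] at hc'
              exact absurd hc' h1
            · exact ⟨e', h, hc'⟩
  exact key (pvEdgesOf t) (fun e he => he)

theorem pvFindFree?_spec {triangles : List (Int × Int × Int)}
    {et : List (Int × Int × List (Int × Int × Int))}
    (hpre : Pre_remove_unwanted_triangles triangles et)
    {X : Finset (Int × Int × Int)}
    (scan : List (Int × Int × Int)) (hscan : ∀ x ∈ scan, x ∈ triangles) :
    (∃ t, pvFindFree? (pvDictOf et)
          ((PySem.Set.ofList triangles).filter (fun u => decide (u ∉ X))) scan =
        some (some t) ∧ t ∈ scan ∧ pvFreeP et (pvAliveF triangles X) t) ∨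
    (pvFindFree? (pvDictOf et)
          ((PySem.Set.ofList triangles).filter (fun u => decide (u ∉ X))) scan =
        some none ∧ ∀ x ∈ scan, ¬ pvFreeP et (pvAliveF triangles X) x) := by
  induction scan with
  | nil => exact Or.inr ⟨rfl, by simp⟩
  | cons t rest ih =>
    have htT : t ∈ triangles := hscan t List.mem_cons_self
    have hrest : ∀ x ∈ rest, x ∈ triangles := fun x hx => hscan x (List.mem_cons_of_mem _ hx)
    rw [pvFindFree?, pvIsFree?_spec hpre htT, Option.bind_some]
    by_cases hf : pvFreeP et (pvAliveF triangles X) t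
    · rw [if_pos (by simpa [pvFreeP] using hf)]
      exact Or.inl ⟨t, rfl, List.mem_cons_self, hf⟩
    · rw [if_neg (by simpa [pvFreeP] using hf)]
      rcases ih hrest with ⟨t', heq, ht', hf'⟩ | ⟨heq, hall⟩
      · exact Or.inl ⟨t', heq, List.mem_cons_of_mem _ ht', hf'⟩
      · refine Or.inr ⟨heq, ?_⟩
        intro x hx
        rcases List.mem_cons.mp hx with rfl | hx'
        · exact hf
        · exact hall x hx' 

-- B's while loop lands on a final state of a run from the same start
theorem pvLoopB_spec {triangles : List (Int × Int × Int)}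
    {et : List (Int × Int × List (Int × Int × Int))}
    (hpre : Pre_remove_unwanted_triangles triangles et) :
    ∀ (fuel : Nat) (X : Finset (Int × Int × Int)),
      (pvAliveF triangles X).card < fuel →
      ∃ F, pvRun et (pvAliveF triangles X) F ∧ pvFinal et F ∧ (∀ x ∈ F, x ∈ triangles) ∧
        pvLoopB (pvDictOf et) fuel
            ((PySem.Set.ofList triangles).filter (fun u => decide (u ∉ X))) =
          some ((PySem.Set.ofList triangles).filter (fun u => decide (u ∈ F))) := by
  intro fuel
  induction fuel with
  | zero =>
    intro X hcard
    omega
  | succ fuel ih =>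
    intro X hcard
    have hscan : ∀ x ∈ (PySem.Set.ofList triangles).filter (fun u => decide (u ∉ X)),
        x ∈ triangles := by
      intro x hx
      exact (PySem.Set.mem_ofList triangles x).mp (List.mem_filter.mp hx).1
    rcases pvFindFree?_spec hpre ((PySem.Set.ofList triangles).filter (fun u => decide (u ∉ X)))
        hscan with ⟨t, heq, htm, hfree⟩ | ⟨heq, hnone⟩
    · obtain ⟨htR, htX⟩ := List.mem_filter.mp htm
      have htT : t ∈ triangles := (PySem.Set.mem_ofList triangles t).mp htR
      have htX' : t ∉ X := by simpa using htX
      have hta : t ∈ pvAliveF triangles X := pvAliveF_mem.mpr ⟨htT, htX'⟩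
      have hdis : PySem.Set.discard
          ((PySem.Set.ofList triangles).filter (fun u => decide (u ∉ X))) t =
          (PySem.Set.ofList triangles).filter (fun u => decide (u ∉ insert t X)) := by
        show List.filter _ _ = _
        rw [List.filter_filter]
        apply List.filter_congr
        intro a _
        by_cases hax : a ∈ X <;> by_cases hat : a = t <;>
          simp [hax, hat, Finset.mem_insert]
      obtain ⟨F, hrun, hfin, hFT, hout⟩ := ih (insert t X) (by
        rw [← pvAliveF_erase]
        have := Finset.card_erase_lt_of_mem hta
        omega)
      refine ⟨F, pvRun.step t hta hfree (by rw [pvAliveF_erase]; exact hrun), hfin, hFT, ?_⟩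
      rw [pvLoopB, heq, Option.bind_some]
      show pvLoopB (pvDictOf et) fuel (PySem.Set.discard
        ((PySem.Set.ofList triangles).filter (fun u => decide (u ∉ X))) t) = _
      rw [hdis]
      exact hout
    · refine ⟨pvAliveF triangles X, pvRun.refl _, ?_, ?_, ?_⟩
      · intro u hu hfree
        obtain ⟨huT, huX⟩ := pvAliveF_mem.mp hu
        exact hnone u (List.mem_filter.mpr ⟨(PySem.Set.mem_ofList triangles u).mpr huT,
          by simpa using huX⟩) hfree
      · intro x hx
        exact (pvAliveF_mem.mp hx).1
      · rw [pvLoopB, heq, Option.bind_some]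
        show some ((PySem.Set.ofList triangles).filter (fun u => decide (u ∉ X))) = _
        congr 1
        apply List.filter_congr
        intro a ha
        have haT : a ∈ triangles := (PySem.Set.mem_ofList triangles a).mp ha
        by_cases hax : a ∈ X <;> simp [pvAliveF_mem, hax, haT]

-- ===== VERDICT (by name: the statement is the Claim_ definition above) =====
theorem remove_unwanted_triangles_spec : Claim_equal_remove_unwanted_triangles := by
  intro triangles et _hdom hpre
  unfold Spec_remove_unwanted_triangles
  have hcard : (pvAliveF triangles (∅ : Finset (Int × Int × Int))).card < triangles.length + 1 := by
    have h1 : (pvAliveF triangles ∅).card ≤ triangles.length := by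
      unfold pvAliveF
      rw [Finset.sdiff_empty]
      exact List.toFinset_card_le _
    omega
  have hfilter0 : (PySem.Set.ofList triangles).filter
      (fun u => decide (u ∉ (∅ : Finset (Int × Int × Int)))) = PySem.Set.ofList triangles := by
    apply List.filter_eq_self.mpr
    intro a _
    simp
  have hinv0 := pvMapInv_empty hpre
  obtain ⟨wl0, hwl0, hwl0nd, hwl0mem⟩ :=
    pvAddFree?_spec hpre hinv0 triangles (fun x hx => hx) PySem.Set.empty
  obtain ⟨FA, hrunA, hfinA, hFTA, houtA⟩ := pvLoopA_spec hpre (triangles.length + 1) ∅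
    (pvDictOf et) (PySem.Set.ofList triangles) wl0 hinv0 hfilter0.symm
    (hwl0nd List.nodup_nil)
    (by
      intro u hu
      rcases (hwl0mem u).mp hu with h | ⟨huT, hufree⟩
      · exact absurd h (List.not_mem_nil)
      · exact ⟨huT, Finset.notMem_empty u, hufree⟩)
    (by
      intro u huT _ hufree
      exact (hwl0mem u).mpr (Or.inr ⟨huT, hufree⟩))
    hcard
  obtain ⟨FB, hrunB, hfinB, hFTB, houtB⟩ := pvLoopB_spec hpre (triangles.length + 1) ∅ hcard
  have hFeq : FA = FB := pvFinal_unique hpre hrunA hrunB hFTA hFTB hfinA hfinB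
  rw [hfilter0] at houtB
  unfold remove_unwanted_triangles remove_unwanted_triangles_alt
  simp only [hwl0, Option.bind_some, houtA, houtB, hFeq, Option.getD_some]
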